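-- pv_equiv track=rewrite | github.com/arbozas/master | src/features.py | balance_classes
-- ===== SOURCE A (Python) =====
-- from collections import Counter
--
-- def balance_classes(xs, ys):
--     freqs = Counter(ys)
-- # the least common class is the maximum number we want for all classes
--     max_allowable = freqs.most_common()[-1][1]
--     num_added = {clss: 0 for clss in freqs.keys()}
--     new_ys = []
--     new_xs = []
--     for i, y in enumerate(ys):
--         if num_added[y] < max_allowable:
--             new_ys.append(y)
--             new_xs.append(xs[i])
--             num_added[y] += 1
--
--     return new_xs, new_ys
-- ===== SOURCE B (Python) =====
-- def balance_classes(xs, ys):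
--     # group: class -> list of indices of its occurrences, in order
--     positions = {}
--     for i, y in enumerate(ys):
--         positions.setdefault(y, []).append(i)
--     # least common class count
--     max_allowable = min(len(v) for v in positions.values())
--     # keep the first max_allowable occurrences of each class
--     selected = {i for v in positions.values() for i in v[:max_allowable]}
--     idxs = [i for i in range(len(ys)) if i in selected]
--     return [xs[i] for i in idxs], [ys[i] for i in idxs]
-- ===== Notes on version B (the rewrite author's own statement) =====
-- stated objective: alternative
-- what changed: replaces A's counter-gated single pass (mutable per-class counters deciding each element as it streams by) with a group-by pass building class->positions lists, a selected-index set of the first max_allowable positions per class, and a final index-gather pass; Pre_ also excludes xs shorter than ys, where A almost always raises IndexError but can return when the out-of-range indices happen to be skipped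
-- outside the precondition, e.g. on balance_classes([1, 2], [5, 6, 5]): A returns ([1, 2], [5, 6]), B returns ([1, 2], [5, 6])
import Mathlib
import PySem

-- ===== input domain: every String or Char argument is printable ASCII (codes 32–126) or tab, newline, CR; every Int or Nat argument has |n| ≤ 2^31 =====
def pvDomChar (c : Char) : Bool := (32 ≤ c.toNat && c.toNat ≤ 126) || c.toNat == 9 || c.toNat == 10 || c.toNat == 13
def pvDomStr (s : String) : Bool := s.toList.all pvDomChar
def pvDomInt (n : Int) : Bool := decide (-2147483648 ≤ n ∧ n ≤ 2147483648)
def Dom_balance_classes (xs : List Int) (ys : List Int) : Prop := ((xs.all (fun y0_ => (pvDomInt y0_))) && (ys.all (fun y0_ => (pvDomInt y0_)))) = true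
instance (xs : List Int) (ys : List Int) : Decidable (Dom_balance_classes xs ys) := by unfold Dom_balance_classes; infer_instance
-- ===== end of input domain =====

-- B replaces A's counter-gated single pass by group-by-position lists, a selected-index
-- set (first max_allowable positions of each class) and an index-gather pass (alternative
-- decomposition, same result; equivalence proved on Pre_ below).

-- ===== PORT A =====
-- loop body of A's 'for i, y in enumerate(ys)' (state: (num_added, new_ys, new_xs))
def stepA (xs : List Int) (max_allowable : Int)
    (st : PySem.Dict Int Int × List Int × List Int) (p : Int × Int) :
    PySem.Dict Int Int × List Int × List Int :=
  if st.1.getD p.2 0 < max_allowable then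
    -- num_added[y] and num_added[y] += 1: y is always a key; xs[i]: in range under Pre_
    (st.1.modify p.2 0 (· + 1), st.2.1 ++ [p.2], st.2.2 ++ [PySem.List.pyGetD xs p.1 0])
  else st

def balance_classes (xs : List Int) (ys : List Int) : List Int × List Int :=
  let freqs := PySem.Dict.counter ys
  let mc := PySem.List.sorted freqs.items (fun p => p.2) true
  -- freqs.most_common()[-1][1]; pyGet? = none is Python's IndexError (empty ys), excluded by Pre_
  let max_allowable := ((PySem.List.pyGet? mc (-1)).map (·.2)).getD 0
  let num_added := freqs.keys.foldl (fun d c => d.insert c (0 : Int)) PySem.Dict.empty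
  let st := (PySem.List.enumerate ys 0).foldl (stepA xs max_allowable)
      (num_added, ([] : List Int), ([] : List Int))
  (st.2.2, st.2.1)

-- ===== PORT B =====
def balance_classes_alt (xs : List Int) (ys : List Int) : List Int × List Int :=
  -- positions.setdefault(y, []).append(i)  ≡  modify y [] (· ++ [i])
  let positions := (PySem.List.enumerate ys 0).foldl
      (fun d p => d.modify p.2 [] (· ++ [p.1])) PySem.Dict.empty
  -- min() raises ValueError on empty ys, excluded by Pre_
  let max_allowable := ((PySem.List.min? (positions.values.map (fun v => (v.length : Int))) (fun x => x)).getD 0)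
  let selected : PySem.Set Int :=
      PySem.Set.ofList (positions.values.flatMap (fun v => PySem.List.slice v none (some max_allowable)))
  let idxs := (PySem.List.pyRange 0 (PySem.List.len ys) 1).filter (fun i => selected.contains i)
  (idxs.map (fun i => PySem.List.pyGetD xs i 0), idxs.map (fun i => PySem.List.pyGetD ys i 0))

-- ===== PRECONDITION & SPEC =====
-- Pre_ excludes empty ys (A raises IndexError) and xs shorter than ys: there A raises
-- IndexError on xs[i] for almost all inputs, but can still return when every out-of-range
-- index belongs to a class already filled to max_allowable (a narrowing; see claim cites).
def Pre_balance_classes (xs : List Int) (ys : List Int) : Prop :=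
  ys ≠ [] ∧ ys.length ≤ xs.length
instance (xs : List Int) (ys : List Int) : Decidable (Pre_balance_classes xs ys) := by
  unfold Pre_balance_classes; infer_instance

def pvWitness_balance_classes : List Int × List Int := ([10, 20, 30, 40, 50], [1, 1, 2, 1, 2])

def Spec_balance_classes (xs : List Int) (ys : List Int) (out : List Int × List Int) : Prop := out = balance_classes_alt xs ys
instance (xs : List Int) (ys : List Int) (out : List Int × List Int) : Decidable (Spec_balance_classes xs ys out) := by unfold Spec_balance_classes; infer_instance

-- ===== CLAIM (what is proved, stated in full; the proofs are below) =====
def Claim_equal_balance_classes : Prop := ∀ (xs : List Int) (ys : List Int), Dom_balance_classes xs ys → Pre_balance_classes xs ys → Spec_balance_classes xs ys (balance_classes xs ys)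

-- ===== LEMMAS AND PROOFS =====

-- the count of class c in ys, as an Int
def cntI (ys : List Int) (c : Int) : Int := (ys.count c : Int)
-- the multiset of class counts, in first-occurrence order
def countsL (ys : List Int) : List Int := (PySem.Set.ofList ys).map (cntI ys)
-- positions (as Nats) at which class c occurs in ys
def posN (ys : List Int) (c : Int) : List Nat :=
  (List.range ys.length).filter (fun k => ys.getD k 0 == c)
def posL (ys : List Int) (c : Int) : List Int := (posN ys c).map (fun (k : Nat) => (k : Int))
-- the kept-index predicate both programs implement
def keepB (ys : List Int) (m : Int) (k : Nat) : Bool :=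
  decide (((ys.take k).count (ys.getD k 0) : Int) < m)
def selN (ys : List Int) (m : Int) : List Nat := (List.range ys.length).filter (keepB ys m)

lemma pairwise_getLast?_min {α : Type} (f : α → Int) :
    ∀ (l : List α), l.Pairwise (fun a b => f b ≤ f a) → ∀ x, l.getLast? = some x →
      ∀ y ∈ l, f x ≤ f y := by
  intro l
  induction l with
  | nil => intro _ x hx; simp at hx
  | cons a t ih =>
    intro hp x hx y hy
    rcases List.pairwise_cons.mp hp with ⟨ha, ht⟩
    cases t with
    | nil =>
      simp only [List.getLast?_singleton, Option.some.injEq] at hx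
      simp only [List.mem_singleton] at hy
      subst hx; subst hy; exact le_refl _
    | cons b t' =>
      have hx' : (b :: t').getLast? = some x := by
        rw [← hx]; exact (List.getLast?_cons_cons ..).symm
      have hxm : x ∈ b :: t' := List.mem_of_getLast? hx'
      rcases List.mem_cons.mp hy with h | h
      · subst h; exact ha x hxm
      · exact ih ht x hx' y h

lemma mA_spec (ys : List Int) (m : Int) (h : ys ≠ [])
    (hm : m = ((PySem.List.pyGet? (PySem.List.sorted (PySem.Dict.counter ys).items (fun p => p.2) true) (-1)).map (·.2)).getD 0) :
    m ∈ countsL ys ∧ ∀ v ∈ countsL ys, m ≤ v := by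
  have hitems : (PySem.Dict.counter ys).items
      = (PySem.Set.ofList ys).map (fun k => (k, (ys.count k : Int))) := PySem.Dict.items_counter ys
  rcases List.exists_mem_of_ne_nil ys h with ⟨y, hy⟩
  have hyS : y ∈ PySem.Set.ofList ys := (PySem.Set.mem_ofList ..).mpr hy
  have hine : (PySem.Dict.counter ys).items ≠ [] := by
    rw [hitems]
    exact List.ne_nil_of_mem (List.mem_map_of_mem hyS)
  set mc := PySem.List.sorted (PySem.Dict.counter ys).items (fun p => p.2) true with hmcdef
  have hmcne : mc ≠ [] := fun hnil => hine ((PySem.List.sorted_eq_nil_iff ..).mp hnil)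
  have hlast : mc.getLast? = some (mc.getLast hmcne) := List.getLast?_eq_some_getLast hmcne
  have hget : m = (mc.getLast hmcne).2 := by
    rw [hm, PySem.List.pyGet?_neg_one, hlast]; rfl
  have hxmem : mc.getLast hmcne ∈ (PySem.Dict.counter ys).items :=
    (PySem.List.mem_sorted ..).mp (List.getLast_mem hmcne)
  constructor
  · rw [hitems] at hxmem
    rcases List.mem_map.mp hxmem with ⟨k, hk, hkv⟩
    refine List.mem_map.mpr ⟨k, hk, ?_⟩
    show cntI ys k = m
    rw [hget, ← hkv, cntI]
  · intro v hv
    rcases List.mem_map.mp hv with ⟨k, hk, hkv⟩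
    have hmem2 : (k, (ys.count k : Int)) ∈ (PySem.Dict.counter ys).items := by
      rw [hitems]; exact List.mem_map_of_mem hk
    have hmem3 : (k, (ys.count k : Int)) ∈ mc := (PySem.List.mem_sorted ..).mpr hmem2
    have hpair : mc.Pairwise (fun a b => a.2 ≥ b.2) := by
      have := PySem.List.sorted_pairwise_rev (xs := (PySem.Dict.counter ys).items) (key := fun p => p.2)
      exact this
    have := pairwise_getLast?_min (fun p => p.2) mc (by simpa using hpair) _ hlast _ hmem3
    rw [hget, ← hkv]
    simpa [cntI] using this

lemma positions_getD (ys : List Int) (c : Int) :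
    ((PySem.List.enumerate ys 0).foldl (fun d p => d.modify p.2 [] (· ++ [p.1]))
      PySem.Dict.empty).getD c [] = posL ys c := by
  have h1 : (PySem.List.enumerate ys 0).foldl (fun d p => d.modify p.2 [] (· ++ [p.1])) PySem.Dict.empty
      = ((PySem.List.enumerate ys 0).map (fun p => (p.2, p.1))).foldl
          (fun d p => d.modify p.1 [] (· ++ [p.2])) PySem.Dict.empty := by
    rw [List.foldl_map]
  rw [h1, PySem.Dict.getD_foldl_modify_append]
  rw [PySem.List.enumerate_eq_map_pyRange (d := 0)]
  simp only [PySem.List.len_eq, PySem.List.pyRange_zero_nat]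
  simp only [List.map_map, List.filter_map]
  simp only [Function.comp_def, PySem.List.pyGetD_natCast]
  rw [posL, posN]
  simp [pysem]

lemma positions_values (ys : List Int) :
    ((PySem.List.enumerate ys 0).foldl (fun d p => d.modify p.2 [] (· ++ [p.1]))
      PySem.Dict.empty).values = (PySem.Set.ofList ys).map (posL ys) := by
  have hnd : ((PySem.List.enumerate ys 0).foldl (fun d p => d.modify p.2 [] (· ++ [p.1]))
      PySem.Dict.empty).keys.Nodup := by
    refine PySem.Dict.nodup_keys_foldl_modify_key (l := PySem.List.enumerate ys 0)
      (key := fun p => p.2) (d0 := ([] : List Int)) (f := fun _ p => (· ++ [p.1]))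
      (d := PySem.Dict.empty) ?_
    simp [pysem]
  have hkeys : ((PySem.List.enumerate ys 0).foldl (fun d p => d.modify p.2 [] (· ++ [p.1]))
      PySem.Dict.empty).keys = PySem.Set.ofList ys := by
    rw [PySem.Dict.keys_foldl_modify_key]
    rw [PySem.List.map_snd_enumerate]
    simp [pysem, PySem.Set.update, PySem.Set.ofList_eq_foldl]
  rw [PySem.Dict.values_eq_map_keys _ hnd [], hkeys]
  exact List.map_congr_left (fun c _ => positions_getD ys c)

lemma map_getD_range (ys : List Int) (k : Nat) (hk : k ≤ ys.length) :
    (List.range k).map (fun j => ys.getD j 0) = ys.take k := by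
  apply List.ext_getElem
  · simp; omega
  · intro i h1 h2
    simp only [List.getElem_map, List.getElem_range, List.getElem_take]
    have hi : i < ys.length := by simp at h2; omega
    rw [List.getD_eq_getElem ys 0 hi]

lemma count_take_eq (ys : List Int) (c : Int) (k : Nat) (hk : k ≤ ys.length) :
    ((List.range k).filter (fun j => ys.getD j 0 == c)).length = (ys.take k).count c := by
  rw [← map_getD_range ys k hk, List.count_eq_countP, List.countP_map,
      List.countP_eq_length_filter]
  rfl

lemma len_posN (ys : List Int) (c : Int) : (posN ys c).length = ys.count c := by
  have := count_take_eq ys c ys.length (le_refl _)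
  rw [List.take_length] at this
  simpa [posN] using this

lemma mB_spec (ys : List Int) (m : Int) (h : ys ≠ [])
    (hm : m = ((PySem.List.min? (((PySem.Set.ofList ys).map (posL ys)).map (fun v => (v.length : Int))) (fun x => x)).getD 0)) :
    m ∈ countsL ys ∧ ∀ v ∈ countsL ys, m ≤ v := by
  have hlens : ((PySem.Set.ofList ys).map (posL ys)).map (fun v => ((v.length : Nat) : Int)) = countsL ys := by
    rw [List.map_map]
    refine List.map_congr_left ?_
    intro c _
    show ((posL ys c).length : Int) = cntI ys c
    simp only [posL, List.length_map, len_posN, cntI]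
  rw [hlens] at hm
  rcases List.exists_mem_of_ne_nil ys h with ⟨y, hy⟩
  have hyS : y ∈ PySem.Set.ofList ys := (PySem.Set.mem_ofList ..).mpr hy
  have hne : countsL ys ≠ [] := by
    unfold countsL
    exact List.ne_nil_of_mem (List.mem_map_of_mem hyS)
  cases hmin : PySem.List.min? (countsL ys) (fun x => x) with
  | none => exact absurd ((PySem.List.min?_eq_none_iff ..).mp hmin) hne
  | some v =>
    rw [hmin] at hm
    simp only [Option.getD_some] at hm
    subst hm
    exact ⟨PySem.List.min?_mem hmin, fun w hw => PySem.List.min?_isMin hmin w hw⟩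

lemma m_pos (ys : List Int) (m : Int) (hmem : m ∈ countsL ys) : 1 ≤ m := by
  rcases List.mem_map.mp hmem with ⟨c, hc, hv⟩
  have hcy : c ∈ ys := (PySem.Set.mem_ofList ..).mp hc
  have := List.count_pos_iff.mpr hcy
  unfold cntI at hv
  omega

-- k is among the first t entries of (range n).filter p iff p k holds, k < n,
-- and fewer than t earlier indices satisfy p
lemma mem_take_filter_range (p : Nat → Bool) (n t k : Nat) :
    k ∈ ((List.range n).filter p).take t ↔
      k < n ∧ p k = true ∧ ((List.range k).filter p).length < t := by
  have hsplit : ∀ m, m ≤ n → List.range n = List.range m ++ List.range' m (n - m) := by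
    intro m hm
    have h2 := List.range'_append (s := 0) (m := m) (n := n - m) (step := 1)
    simp only [Nat.zero_add, Nat.one_mul] at h2
    rw [Nat.add_sub_cancel' hm] at h2
    rw [List.range_eq_range', ← h2, List.range_eq_range']
  have hsucc : ∀ m, m < n → List.range' m (n - m) = m :: List.range' (m+1) (n - m - 1) := by
    intro m hm
    rw [show n - m = (n-m-1)+1 from by omega, List.range'_succ]
    norm_num
  constructor
  · intro h
    have hmem : k ∈ (List.range n).filter p := List.mem_of_mem_take h
    have hk : k < n := List.mem_range.mp (List.mem_of_mem_filter hmem)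
    have hp : p k = true := List.of_mem_filter hmem
    refine ⟨hk, hp, ?_⟩
    rw [hsplit k (le_of_lt hk), hsucc k hk, List.filter_append, List.filter_cons_of_pos hp,
        List.take_append] at h
    rcases List.mem_append.mp h with h1 | h2
    · exfalso
      have := List.mem_range.mp (List.mem_of_mem_filter (List.mem_of_mem_take h1))
      omega
    · by_contra hc
      have hz : t - ((List.range k).filter p).length = 0 := by omega
      rw [hz] at h2; simp at h2
  · rintro ⟨hk, hp, hlen⟩
    rw [hsplit k (le_of_lt hk), hsucc k hk, List.filter_append, List.filter_cons_of_pos hp,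
        List.take_append]
    apply List.mem_append.mpr; right
    rw [show t - ((List.range k).filter p).length
          = (t - ((List.range k).filter p).length - 1) + 1 from by omega, List.take_succ_cons]
    exact List.mem_cons_self ..

lemma init_dict_getD (ys : List Int) (c : Int) :
    ((PySem.Dict.counter ys).keys.foldl (fun d c => d.insert c (0 : Int)) PySem.Dict.empty).getD c 0 = 0 := by
  have aux : ∀ (l : List Int) (d : PySem.Dict Int Int), d.getD c 0 = 0 →
      (l.foldl (fun d c => d.insert c (0 : Int)) d).getD c 0 = 0 := by
    intro l
    induction l with
    | nil => intro d h; exact h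
    | cons a t ih =>
      intro d h
      refine ih _ ?_
      simp [pysem]
      intro hne
      exact h
  exact aux _ _ (by simp [pysem])

lemma loopA (xs full : List Int) (m : Int) :
    ∀ (fuel k : Nat) (d : PySem.Dict Int Int) (ny nx : List Int),
      fuel = full.length - k → k ≤ full.length →
      (∀ c, d.getD c 0 = min ((full.take k).count c : Int) m) →
      ((PySem.List.enumerate (full.drop k) k).foldl (stepA xs m) (d, ny, nx)).2 =
        (ny ++ ((List.range' k (full.length - k)).filter (keepB full m)).map (fun j => full.getD j 0),
         nx ++ ((List.range' k (full.length - k)).filter (keepB full m)).map (fun j => xs.getD j 0)) := by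
  intro fuel
  induction fuel with
  | zero =>
    intro k d ny nx hf hk hinv
    rw [List.drop_of_length_le (show full.length ≤ k by omega)]
    rw [show full.length - k = 0 by omega]
    simp [PySem.List.enumerate_nil, List.range'_zero]
  | succ f ih =>
    intro k d ny nx hf hk hinv
    have hklt : k < full.length := by omega
    rw [List.drop_eq_getElem_cons hklt, PySem.List.enumerate_cons, List.foldl_cons]
    rw [show ((k : Int) + 1) = (((k+1 : Nat)) : Int) by push_cast; ring]
    have hrange : List.range' k (full.length - k) = k :: List.range' (k+1) (full.length - (k+1)) := by
      rw [show full.length - k = (full.length - (k+1))+1 from by omega, List.range'_succ]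
    rw [hrange]
    have hgetDk : full.getD k 0 = full[k] := List.getD_eq_getElem full 0 hklt
    by_cases hkeep : ((full.take k).count full[k] : Int) < m
    · have hcond : (stepA xs m (d, ny, nx) ((k:Int), full[k]))
          = (d.modify full[k] 0 (· + 1), ny ++ [full[k]], nx ++ [PySem.List.pyGetD xs (k:Int) 0]) := by
        have hlt : d.getD full[k] 0 < m := by rw [hinv full[k]]; omega
        rw [stepA]
        simp only [hlt, if_pos]
      rw [hcond]
      rw [ih (k+1) _ _ _ (by omega) (by omega) ?_]
      · have hkB : keepB full m k = true := by
          rw [keepB, hgetDk]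
          simpa using hkeep
        rw [List.filter_cons_of_pos hkB]
        simp only [List.map_cons, hgetDk, PySem.List.pyGetD_natCast]
        simp [List.append_assoc]
      · intro c
        have h2 := PySem.Dict.getD_foldl_modify_add_one (l := [full[k]]) (d := d) (v := c)
        simp only [List.foldl_cons, List.foldl_nil] at h2
        rw [h2, hinv c]
        rw [List.take_add_one, List.getElem?_eq_getElem hklt]
        simp only [Option.toList_some, List.count_append]
        by_cases hc : c = full[k]
        · subst hc
          simp only [List.count_cons, List.count_nil, BEq.rfl]
          push_cast
          omega
        · have : [full[k]].count c = 0 := by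
            simp [Ne.symm hc]
          rw [this]
          simp
    · have hge : m ≤ ((full.take k).count full[k] : Int) := by omega
      have hcond : (stepA xs m (d, ny, nx) ((k:Int), full[k])) = (d, ny, nx) := by
        have hlt : ¬ d.getD full[k] 0 < m := by rw [hinv full[k]]; omega
        rw [stepA]
        simp only [hlt, if_false]
      rw [hcond]
      rw [ih (k+1) _ _ _ (by omega) (by omega) ?_]
      · have hkB : keepB full m k = false := by
          rw [keepB, hgetDk]
          simpa using hkeep
        rw [List.filter_cons_of_neg (by simp [hkB])]
      · intro c
        rw [hinv c]
        rw [List.take_add_one, List.getElem?_eq_getElem hklt]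
        simp only [Option.toList_some, List.count_append]
        by_cases hc : c = full[k]
        · subst hc
          simp only [List.count_cons, List.count_nil, BEq.rfl]
          push_cast
          omega
        · have : [full[k]].count c = 0 := by
            simp [Ne.symm hc]
          rw [this]
          simp

lemma portA_eq (xs ys : List Int) (m : Int) (hys : ys ≠ [])
    (hm : m = ((PySem.List.pyGet? (PySem.List.sorted (PySem.Dict.counter ys).items (fun p => p.2) true) (-1)).map (·.2)).getD 0) :
    balance_classes xs ys =
      ((selN ys m).map (fun j => xs.getD j 0), (selN ys m).map (fun j => ys.getD j 0)) := by
  have hm1 : (1:Int) ≤ m := m_pos ys m (mA_spec ys m hys hm).1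
  have h0 := loopA xs ys m ys.length 0
      ((PySem.Dict.counter ys).keys.foldl (fun d c => d.insert c (0 : Int)) PySem.Dict.empty) [] []
      (by omega) (by omega) ?hinv
  case hinv =>
    intro c
    rw [init_dict_getD]
    simp
    omega
  rw [List.drop_zero] at h0
  simp only [Nat.cast_zero, Nat.sub_zero] at h0
  rw [show List.range' 0 ys.length = List.range ys.length from List.range_eq_range'.symm] at h0
  simp only [balance_classes, ← hm]
  rw [h0]
  simp [selN]

lemma portB_eq (xs ys : List Int) (m : Int) (hys : ys ≠ [])
    (hm : m = ((PySem.List.min? ((((PySem.List.enumerate ys 0).foldl (fun d p => d.modify p.2 [] (· ++ [p.1])) PySem.Dict.empty)).values.map (fun v => (v.length : Int))) (fun x => x)).getD 0)) :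
    balance_classes_alt xs ys =
      ((selN ys m).map (fun j => xs.getD j 0), (selN ys m).map (fun j => ys.getD j 0)) := by
  have hv := positions_values ys
  have hmS : m = ((PySem.List.min? (((PySem.Set.ofList ys).map (posL ys)).map (fun v => (v.length : Int))) (fun x => x)).getD 0) := by
    rw [hm, hv]
  have hmem := (mB_spec ys m hys hmS).1
  have hm1 : (1:Int) ≤ m := m_pos ys m hmem
  have hsel : ∀ k, k < ys.length →
      (PySem.Set.contains (PySem.Set.ofList (((PySem.Set.ofList ys).map (posL ys)).flatMap
        (fun v => PySem.List.slice v none (some m)))) ((k : Nat) : Int)) = keepB ys m k := by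
    intro k hk
    have hiff : ((k : Nat) : Int) ∈ PySem.Set.ofList (((PySem.Set.ofList ys).map (posL ys)).flatMap
        (fun v => PySem.List.slice v none (some m))) ↔
        (((ys.take k).count (ys.getD k 0) : Int) < m) := by
      rw [PySem.Set.mem_ofList]
      rw [List.mem_flatMap]
      constructor
      · rintro ⟨v, hvmem, hkv⟩
        rcases List.mem_map.mp hvmem with ⟨c, hcS, rfl⟩
        rw [PySem.List.slice_to _ (by omega), posL, ← List.map_take] at hkv
        rcases List.mem_map.mp hkv with ⟨j, hj, hjk⟩
        have hj' : j = k := by exact_mod_cast hjk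
        subst hj'
        rw [posN] at hj
        obtain ⟨_, hpk, hlen⟩ := (mem_take_filter_range _ _ _ _).mp hj
        have hc : ys.getD j 0 = c := by simpa using hpk
        rw [hc]
        rw [count_take_eq ys c j (by omega)] at hlen
        omega
      · intro hcount
        refine ⟨posL ys (ys.getD k 0), List.mem_map_of_mem ?_, ?_⟩
        · rw [PySem.Set.mem_ofList, List.getD_eq_getElem ys 0 hk]
          exact List.getElem_mem hk
        · rw [PySem.List.slice_to _ (by omega), posL, ← List.map_take]
          refine List.mem_map_of_mem ?_
          rw [posN]
          refine (mem_take_filter_range _ _ _ _).mpr ⟨hk, by simp, ?_⟩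
          rw [count_take_eq ys (ys.getD k 0) k (by omega)]
          omega
    rw [PySem.Set.contains_eq_decide, keepB]
    exact decide_eq_decide.mpr hiff
  simp only [balance_classes_alt, ← hm]
  rw [hv]
  simp only [PySem.List.len_eq, PySem.List.pyRange_zero_nat]
  rw [List.filter_map]
  simp only [Function.comp_def]
  rw [List.filter_congr (l := List.range ys.length)
      (q := keepB ys m) (fun x hx => hsel x (List.mem_range.mp hx))]
  simp only [List.map_map, Function.comp_def, PySem.List.pyGetD_natCast]
  rw [selN]

-- ===== VERDICT (by name: the statement is the Claim_ definition above) =====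
theorem balance_classes_spec : Claim_equal_balance_classes := by
  intro xs ys _hdom hpre
  obtain ⟨hys, _hlen⟩ := hpre
  unfold Spec_balance_classes
  rw [portA_eq xs ys _ hys rfl, portB_eq xs ys _ hys rfl]
  obtain ⟨ha1, ha2⟩ := mA_spec ys _ hys rfl
  obtain ⟨hb1, hb2⟩ := mB_spec ys
      ((PySem.List.min? ((((PySem.List.enumerate ys 0).foldl (fun d p => d.modify p.2 [] (· ++ [p.1])) PySem.Dict.empty)).values.map (fun v => (v.length : Int))) (fun x => x)).getD 0)
      hys (by rw [positions_values ys])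
  have heq := le_antisymm (ha2 _ hb1) (hb2 _ ha1)
  rw [heq]
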